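-- pv_equiv track=rewrite | github.com/Tehlikeli107/ToposAI | topos_ai/formal_category.py | _all_functions
-- ===== SOURCE A (Python) =====
-- from itertools import combinations, product
--
-- def _all_functions(domain, codomain):
--     domain = tuple(domain)
--     codomain = tuple(codomain)
--     if not domain:
--         return ({},)
--     if not codomain:
--         return ()
--     return tuple(dict(zip(domain, outputs)) for outputs in product(codomain, repeat=len(domain)))
-- ===== SOURCE B (Python) =====
-- def _all_functions(domain, codomain):
--     results = [{}]
--     for d in domain:
--         results = [{**partial, d: c} for partial in results for c in codomain]
--     return tuple(results)
-- ===== Notes on version B (the rewrite author's own statement) =====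
-- stated objective: alternative
-- what changed: B builds the mappings incrementally with one fold over the domain, extending each partial dict by every codomain value, instead of materialising itertools.product output-tuples and zipping each with the domain; the empty-domain/empty-codomain cases fall out of the loop with no special-casing.
import Mathlib
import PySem

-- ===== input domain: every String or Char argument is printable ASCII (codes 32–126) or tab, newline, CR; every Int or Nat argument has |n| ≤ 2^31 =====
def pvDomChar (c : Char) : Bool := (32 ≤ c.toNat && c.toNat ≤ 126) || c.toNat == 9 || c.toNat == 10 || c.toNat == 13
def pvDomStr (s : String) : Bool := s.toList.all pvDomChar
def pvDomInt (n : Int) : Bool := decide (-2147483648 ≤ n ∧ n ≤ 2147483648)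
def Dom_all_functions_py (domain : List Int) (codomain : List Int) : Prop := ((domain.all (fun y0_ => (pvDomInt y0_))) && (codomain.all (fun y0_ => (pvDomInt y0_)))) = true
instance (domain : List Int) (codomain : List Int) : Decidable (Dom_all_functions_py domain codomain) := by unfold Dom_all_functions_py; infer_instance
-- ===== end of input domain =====

-- B rebuilds the set of mappings incrementally (one fold over the domain, extending each
-- partial dict by every codomain value) instead of materialising itertools.product tuples
-- and zipping each with the domain; same output, no tuple-of-outputs intermediate. (objective: alternative)

-- ===== PORT A =====
-- itertools.product(codomain, repeat=n): first coordinate varies slowest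
def pvProdRep (codomain : List Int) : Nat → List (List Int)
  | 0 => [[]]
  | n + 1 => codomain.flatMap (fun c => (pvProdRep codomain n).map (fun outs => c :: outs))

-- dict(zip(domain, outputs)): insert the zipped pairs left to right into an empty dict
def pvDictOfZip (domain outs : List Int) : PySem.Dict Int Int :=
  (domain.zip outs).foldl (fun d p => d.insert p.1 p.2) PySem.Dict.empty

def all_functions_py (domain : List Int) (codomain : List Int) : List (List (Int × Int)) :=
  if domain = [] then [[]]
  else if codomain = [] then []
  else (pvProdRep codomain domain.length).map (fun outs => (pvDictOfZip domain outs).items)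

-- ===== PORT B =====
def all_functions_py_alt (domain : List Int) (codomain : List Int) : List (List (Int × Int)) :=
  (domain.foldl
      (fun results d => results.flatMap (fun p => codomain.map (fun c => p.insert d c)))
      [PySem.Dict.empty]).map (fun d => d.items)

-- ===== PRECONDITION & SPEC =====
def Spec_all_functions_py (domain : List Int) (codomain : List Int) (out : List (List (Int × Int))) : Prop := out = all_functions_py_alt domain codomain
instance (domain : List Int) (codomain : List Int) (out : List (List (Int × Int))) : Decidable (Spec_all_functions_py domain codomain out) := by unfold Spec_all_functions_py; infer_instance

-- ===== CLAIM (what is proved, stated in full; the proofs are below) =====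
def Claim_equal_all_functions_py : Prop := ∀ (domain : List Int) (codomain : List Int), Dom_all_functions_py domain codomain → Spec_all_functions_py domain codomain (all_functions_py domain codomain)

-- ===== LEMMAS AND PROOFS =====

-- B's fold, started from any list of partial dicts, equals every partial extended by every
-- product tuple (zipped with the remaining domain and inserted pairwise).
theorem pvFoldl_step (codomain : List Int) :
    ∀ (rest : List Int) (ps : List (PySem.Dict Int Int)),
      rest.foldl (fun results d => results.flatMap (fun p => codomain.map (fun c => p.insert d c))) ps
        = ps.flatMap (fun p => (pvProdRep codomain rest.length).map
            (fun outs => (rest.zip outs).foldl (fun d q => d.insert q.1 q.2) p)) := by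
  intro rest
  induction rest with
  | nil =>
      intro ps
      simp [pvProdRep, List.flatMap_singleton']
  | cons d rest ih =>
      intro ps
      simp only [List.foldl_cons, ih, pvProdRep, List.length_cons]
      rw [List.flatMap_assoc]
      simp [List.flatMap_map, List.map_flatMap, List.map_map, Function.comp_def]

theorem pvB_eq (domain codomain : List Int) :
    all_functions_py_alt domain codomain
      = ((pvProdRep codomain domain.length).map (fun outs => pvDictOfZip domain outs)).map
          (fun d => d.items) := by
  unfold all_functions_py_alt
  rw [pvFoldl_step]
  simp [pvDictOfZip, List.flatMap]

-- ===== VERDICT (by name: the statement is the Claim_ definition above) =====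
theorem all_functions_py_spec : Claim_equal_all_functions_py := by
  intro domain codomain _
  unfold Spec_all_functions_py all_functions_py
  rw [pvB_eq]
  split_ifs with h1 h2
  · subst h1
    simp [pvProdRep, pvDictOfZip]
    rfl
  · subst h2
    cases domain with
    | nil => simp at h1
    | cons d rest => simp [pvProdRep]
  · simp [List.map_map]
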